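-- pv_equiv track=rewrite | github.com/pranaliSawadh/python-practical | practical5/dfa.py | q0
-- ===== SOURCE A (Python) =====
-- def q0(text):
-- 		alphabets = {"a","b"}
-- 		if len(text)>0:
-- 			symbol = text[0]
-- 			if symbol in alphabets:
-- 				if symbol == "b" :
-- 					return q1(text[1:])
-- 				else:
-- 					return q0(text[1:])
-- 			else:
-- 				return "rejected"
-- 		else:
-- 			return "q0"
--
-- def q1(text):
-- 		alphabets = {"a","b"}
-- 		if len(text)>0:
-- 			symbol = text[0]
-- 			if symbol in alphabets:
-- 				if symbol == "b" :
-- 					return q1(text[1:])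
-- 				else:
-- 					return q0(text[1:])
-- 			else:
-- 				return "rejected"
-- 		else:
-- 			return "q1"
-- ===== SOURCE B (Python) =====
-- def q0(text):
--     if any(c not in "ab" for c in text):
--         return "rejected"
--     return "q1" if text and text[-1] == "b" else "q0"
-- ===== Notes on version B (the rewrite author's own statement) =====
-- stated objective: faster
-- what changed: replaces the mutually recursive state machine that re-slices the string at every step with a single scan for invalid characters plus a direct look at the last character
import Mathlib
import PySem

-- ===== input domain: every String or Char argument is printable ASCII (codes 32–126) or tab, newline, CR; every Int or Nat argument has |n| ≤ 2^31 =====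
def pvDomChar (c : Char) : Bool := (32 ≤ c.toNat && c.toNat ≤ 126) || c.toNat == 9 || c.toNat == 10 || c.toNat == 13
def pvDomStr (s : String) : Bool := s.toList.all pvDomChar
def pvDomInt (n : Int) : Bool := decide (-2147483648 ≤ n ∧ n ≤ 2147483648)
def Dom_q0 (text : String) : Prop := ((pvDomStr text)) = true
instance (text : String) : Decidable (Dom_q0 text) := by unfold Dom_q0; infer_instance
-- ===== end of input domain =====

-- B is a single pass (invalid-character scan + last character) instead of A's mutually
-- recursive state machine that re-slices the string at every step; objective: faster.

-- ===== PORT A =====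
-- A: two mutually recursive states over the characters; each call looks at the head
-- (text[0]) and recurses on the tail (text[1:]).
mutual
def q0RecA : List Char → String
  | [] => "q0"
  | c :: rest =>
      if c = 'a' ∨ c = 'b' then
        if c = 'b' then q1RecA rest else q0RecA rest
      else "rejected"
def q1RecA : List Char → String
  | [] => "q1"
  | c :: rest =>
      if c = 'a' ∨ c = 'b' then
        if c = 'b' then q1RecA rest else q0RecA rest
      else "rejected"
end

def q0 (text : String) : String := q0RecA text.toList

-- ===== PORT B =====
-- B: any(c not in "ab" for c in text) → rejected; else decided by the last character.
def q0_alt (text : String) : String :=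
  if text.toList.any (fun c => ¬ (c = 'a' ∨ c = 'b')) then "rejected"
  else if text.toList ≠ [] ∧ text.toList.getLast? = some 'b' then "q1" else "q0"

-- ===== PRECONDITION & SPEC =====
def Spec_q0 (text : String) (out : String) : Prop := out = q0_alt text
instance (text : String) (out : String) : Decidable (Spec_q0 text out) := by unfold Spec_q0; infer_instance

-- ===== CLAIM (what is proved, stated in full; the proofs are below) =====
def Claim_equal_q0 : Prop := ∀ (text : String), Dom_q0 text → Spec_q0 text (q0 text)

-- ===== LEMMAS AND PROOFS =====

-- B's value, parametrised by the state name returned on the empty string.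
def pvSpecFrom (s : String) (cs : List Char) : String :=
  if cs.any (fun c => ¬ (c = 'a' ∨ c = 'b')) then "rejected"
  else if cs.getLast? = some 'b' then "q1"
  else if cs = [] then s else "q0"

theorem pvSpecFrom_cons (s : String) (c : Char) (rest : List Char) :
    pvSpecFrom s (c :: rest) =
      if c = 'b' then pvSpecFrom "q1" rest
      else if c = 'a' then pvSpecFrom "q0" rest
      else "rejected" := by
  by_cases hb : c = 'b'
  · subst hb
    cases rest with
    | nil => simp [pvSpecFrom]
    | cons d ds => simp [pvSpecFrom, List.getLast?_cons_cons]
  · by_cases ha : c = 'a'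
    · subst ha
      cases rest with
      | nil => simp [pvSpecFrom]
      | cons d ds => simp [pvSpecFrom, List.getLast?_cons_cons]
    · simp [pvSpecFrom, ha, hb]

theorem pvRec_eq_specFrom (cs : List Char) :
    q0RecA cs = pvSpecFrom "q0" cs ∧ q1RecA cs = pvSpecFrom "q1" cs := by
  induction cs with
  | nil => simp [q0RecA, q1RecA, pvSpecFrom]
  | cons c rest ih =>
    obtain ⟨ih0, ih1⟩ := ih
    constructor <;> rw [pvSpecFrom_cons] <;>
    · by_cases hb : c = 'b'
      · simp [q0RecA, q1RecA, hb, ih1]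
      · by_cases ha : c = 'a'
        · simp [q0RecA, q1RecA, ha, ih0]
        · simp [q0RecA, q1RecA, ha, hb]

-- ===== VERDICT (by name: the statement is the Claim_ definition above) =====
theorem q0_spec : Claim_equal_q0 := by
  intro text _
  unfold Spec_q0 q0 q0_alt
  rw [(pvRec_eq_specFrom text.toList).1]
  cases h : text.toList with
  | nil => simp [pvSpecFrom]
  | cons c rest =>
    unfold pvSpecFrom
    by_cases hbad : (c :: rest).any (fun c => ¬ (c = 'a' ∨ c = 'b'))
    · simp
    · by_cases hl : (c :: rest).getLast? = some 'b' <;> simp [hl]
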